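-- pv_equiv track=rewrite | github.com/coreline-ai/simple-RAG-chat | app/services/parsers/labeler.py | _is_natural_flow
-- ===== SOURCE A (Python) =====
-- FLOW_MERGE_RULES: list[set[str]] = [
--     {"discovery"},                      # 발견 단독
--     {"attempt", "failure"},             # 시도 → 실패
--     {"fix", "result"},                  # 수정 → 결과
--     {"verification"},                   # 검증 단독
--     {"next_action"},                    # 후속 조치 단독
--     {"attempt", "fix"},                 # 시도 → 수정
--     {"result", "verification"},         # 결과 → 검증
-- ]
--
-- def _is_natural_flow(label_set: set[str]) -> bool:
--     """라벨 조합이 자연스러운 흐름인지 확인"""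
--     # other는 항상 독립
--     if "other" in label_set:
--         return False
--
--     clean = label_set - {"other"}
--     for rule in FLOW_MERGE_RULES:
--         if clean.issubset(rule):
--             return True
--     return False
-- ===== SOURCE B (Python) =====
-- FLOW_MERGE_RULES: list[set[str]] = [
--     {"discovery"},
--     {"attempt", "failure"},
--     {"fix", "result"},
--     {"verification"},
--     {"next_action"},
--     {"attempt", "fix"},
--     {"result", "verification"},
-- ]
--
-- # All label sets that are a subset of some rule: the union of each rule's powerset.
-- VALID_FLOW_SETS: set = set()
-- for _rule in FLOW_MERGE_RULES:
--     _subsets = [frozenset()]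
--     for _x in sorted(_rule):
--         _subsets += [s | {_x} for s in _subsets]
--     VALID_FLOW_SETS.update(_subsets)
--
--
-- def _is_natural_flow(label_set: set[str]) -> bool:
--     """라벨 조합이 자연스러운 흐름인지 확인"""
--     if "other" in label_set:
--         return False
--     return frozenset(label_set) in VALID_FLOW_SETS
-- ===== Notes on version B (the rewrite author's own statement) =====
-- stated objective: simpler
-- what changed: Replaces the per-call loop of issubset scans over FLOW_MERGE_RULES with a module-level precomputed table VALID_FLOW_SETS (the union of each rule's powerset) and a single frozenset membership lookup.
import Mathlib
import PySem

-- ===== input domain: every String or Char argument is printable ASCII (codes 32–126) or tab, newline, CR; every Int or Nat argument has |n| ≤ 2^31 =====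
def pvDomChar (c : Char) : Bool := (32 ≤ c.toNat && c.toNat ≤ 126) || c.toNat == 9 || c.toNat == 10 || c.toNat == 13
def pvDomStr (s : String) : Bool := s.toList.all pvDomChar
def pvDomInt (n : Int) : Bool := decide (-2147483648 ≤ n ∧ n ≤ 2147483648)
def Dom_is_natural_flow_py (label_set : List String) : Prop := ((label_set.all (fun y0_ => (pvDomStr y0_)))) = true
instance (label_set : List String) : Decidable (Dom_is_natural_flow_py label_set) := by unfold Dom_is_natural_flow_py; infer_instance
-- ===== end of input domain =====

-- B replaces A's per-call issubset scan over the rules with a precomputed table of all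
-- rule subsets and a single set-membership lookup (objective: simpler).

-- ===== PORT A =====
def flowMergeRules : List (List String) :=
  [["discovery"], ["attempt", "failure"], ["fix", "result"],
   ["verification"], ["next_action"], ["attempt", "fix"], ["result", "verification"]]

def is_natural_flow_py (label_set : List String) : Bool :=
  if label_set.contains "other" then false
  else
    -- clean = label_set - {"other"}
    let clean := label_set.filter (fun x => x != "other")
    -- for rule in FLOW_MERGE_RULES: if clean.issubset(rule): return True / return False
    flowMergeRules.any (fun rule => clean.all (fun x => rule.contains x))

-- ===== PORT B =====
-- VALID_FLOW_SETS: union of the powerset of each rule (duplicates harmless for membership)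
def validFlowSets : List (List String) :=
  flowMergeRules.foldl (fun acc rule =>
    acc ++ rule.foldl (fun subs x => subs ++ subs.map (fun s => s ++ [x])) [[]]) []

def is_natural_flow_py_alt (label_set : List String) : Bool :=
  if label_set.contains "other" then false
  else
    -- frozenset(label_set) in VALID_FLOW_SETS : membership is set-equality with some entry
    validFlowSets.any (fun v =>
      label_set.all (fun x => v.contains x) && v.all (fun x => label_set.contains x))

-- ===== PRECONDITION & SPEC =====
def Spec_is_natural_flow_py (label_set : List String) (out : Bool) : Prop := out = is_natural_flow_py_alt label_set
instance (label_set : List String) (out : Bool) : Decidable (Spec_is_natural_flow_py label_set out) := by unfold Spec_is_natural_flow_py; infer_instance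

-- ===== CLAIM (what is proved, stated in full; the proofs are below) =====
def Claim_equal_is_natural_flow_py : Prop := ∀ (label_set : List String), Dom_is_natural_flow_py label_set → Spec_is_natural_flow_py label_set (is_natural_flow_py label_set)

-- ===== LEMMAS AND PROOFS =====

-- every sublist of every rule is an entry of validFlowSets
lemma sublists_mem_valid : ∀ r ∈ flowMergeRules, ∀ s ∈ r.sublists, s ∈ validFlowSets := by
  decide

-- every entry of validFlowSets is contained in some rule
lemma valid_sub_rule : ∀ v ∈ validFlowSets, ∃ r ∈ flowMergeRules, ∀ x ∈ v, x ∈ r := by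
  decide

lemma filter_ne_other (l : List String) (h : l.contains "other" = false) :
    l.filter (fun x => x != "other") = l := by
  rw [List.filter_eq_self]
  intro a ha
  simp only [bne_iff_ne, ne_eq]
  rintro rfl
  simp at h
  exact h ha

lemma forward (l : List String) (r : List String) (hr : r ∈ flowMergeRules)
    (h : ∀ x ∈ l, x ∈ r) :
    validFlowSets.any (fun v =>
      l.all (fun x => v.contains x) && v.all (fun x => l.contains x)) = true := by
  have hsub : (r.filter (fun y => l.contains y)) ∈ validFlowSets :=
    sublists_mem_valid r hr _ (List.mem_sublists.2 List.filter_sublist)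
  rw [List.any_eq_true]
  refine ⟨_, hsub, ?_⟩
  rw [Bool.and_eq_true, List.all_eq_true, List.all_eq_true]
  constructor
  · intro x hx
    simp only [List.contains_iff_mem, List.mem_filter]
    exact ⟨h x hx, by simp [hx]⟩
  · intro x hx
    exact (List.mem_filter.1 hx).2

lemma backward (l : List String) (v : List String) (hv : v ∈ validFlowSets)
    (h1 : ∀ x ∈ l, x ∈ v) :
    flowMergeRules.any (fun rule => l.all (fun x => rule.contains x)) = true := by
  obtain ⟨r, hr, hvr⟩ := valid_sub_rule v hv
  rw [List.any_eq_true]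
  refine ⟨r, hr, ?_⟩
  rw [List.all_eq_true]
  intro x hx
  simp only [List.contains_iff_mem]
  exact hvr x (h1 x hx)

lemma main_eq (l : List String) : is_natural_flow_py l = is_natural_flow_py_alt l := by
  unfold is_natural_flow_py is_natural_flow_py_alt
  by_cases h : l.contains "other" = true
  · rw [List.contains_iff_mem] at h
    simp [h]
  · rw [Bool.not_eq_true] at h
    simp only [h, Bool.false_eq_true, if_false, filter_ne_other l h]
    apply Bool.eq_iff_iff.2
    rw [List.any_eq_true, List.any_eq_true]
    constructor
    · rintro ⟨r, hr, hall⟩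
      rw [List.all_eq_true] at hall
      have h' : ∀ x ∈ l, x ∈ r := by
        intro x hx
        have := hall x hx
        simpa [List.contains_iff_mem] using this
      have := forward l r hr h'
      rwa [List.any_eq_true] at this
    · rintro ⟨v, hv, hall⟩
      rw [Bool.and_eq_true, List.all_eq_true, List.all_eq_true] at hall
      have h1 : ∀ x ∈ l, x ∈ v := by
        intro x hx
        have := hall.1 x hx
        simpa [List.contains_iff_mem] using this
      have := backward l v hv h1
      rwa [List.any_eq_true] at this

-- ===== VERDICT (by name: the statement is the Claim_ definition above) =====
theorem is_natural_flow_py_spec : Claim_equal_is_natural_flow_py := by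
  intro l _
  unfold Spec_is_natural_flow_py
  exact main_eq l
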